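-- pv_equiv track=rewrite | github.com/OrenVo/AdventOfCode | AoC2024/05/main.py | filterSequences
-- ===== SOURCE A (Python) =====
-- def checkIfValid(seen: set, x: int, rules: dict) -> bool:
--     for v in rules[x]:
--         if v in seen:
--             return False
--     else:
--         return True
--
-- def filterSequences(rules: dict, sequences: list) -> tuple[list, list]:
--     res = []
--     bad = []
--     for s in sequences:
--         seen = set()
--         valid = True
--         for x in s:
--             if x in rules:
--                 if not (valid := checkIfValid(seen, x, rules)):
--                     break
--             seen.add(x)
--         if valid:
--             res.append(s)
--         else:
--             bad.append(s)
--
--     return res, bad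
-- ===== SOURCE B (Python) =====
-- def _violates(rules, s):
--     # Walk the sequence BACKWARD keeping `after` = union of rules[y] over the
--     # elements y already seen (i.e. those that come later in s).  The sequence
--     # is invalid iff some element lies in that union, i.e. exists i < j with
--     # s[i] in rules.get(s[j], ()).
--     after = set()
--     for x in reversed(s):
--         if x in after:
--             return True
--         after.update(rules.get(x, ()))
--     return False
--
--
-- def filterSequences(rules: dict, sequences: list) -> tuple[list, list]:
--     res = []
--     bad = []
--     for s in sequences:
--         if _violates(rules, s):
--             bad.append(s)
--         else:
--             res.append(s)
--     return res, bad
-- ===== Notes on version B (the rewrite author's own statement) =====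
-- stated objective: alternative
-- what changed: B judges each sequence by a backward traversal that maintains the union of rule successor sets of the elements already passed (and uses rules.get so no lookup can fail), instead of A's forward scan with a seen-elements set probed through checkIfValid; then it partitions in one pass.
import Mathlib
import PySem

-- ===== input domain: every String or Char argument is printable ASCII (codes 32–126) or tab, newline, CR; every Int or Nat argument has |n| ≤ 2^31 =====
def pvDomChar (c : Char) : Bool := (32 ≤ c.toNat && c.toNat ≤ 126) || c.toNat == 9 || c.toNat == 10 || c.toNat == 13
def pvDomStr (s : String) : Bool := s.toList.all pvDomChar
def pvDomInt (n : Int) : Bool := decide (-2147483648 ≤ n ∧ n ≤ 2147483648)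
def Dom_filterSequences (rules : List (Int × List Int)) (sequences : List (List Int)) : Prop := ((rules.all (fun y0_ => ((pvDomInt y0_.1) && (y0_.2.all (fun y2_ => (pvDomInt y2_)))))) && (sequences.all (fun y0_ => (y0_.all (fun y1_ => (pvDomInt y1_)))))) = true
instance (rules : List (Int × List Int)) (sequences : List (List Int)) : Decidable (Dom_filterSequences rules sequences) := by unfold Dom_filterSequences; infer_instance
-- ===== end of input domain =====

-- B replaces A's forward scan with a seen-elements set by a backward traversal keeping the union of successor rule-sets (via rules.get); same partition, alternative decomposition.

-- ===== PORT A =====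
-- the 'for v in rules[x]: if v in seen: return False / else: return True' loop of checkIfValid
def checkIfValidLoop (seen : PySem.Set Int) : List Int → Bool
  | [] => true
  | v :: rest => if PySem.Set.contains seen v then false else checkIfValidLoop seen rest

-- rules[x]; every call site has x in rules, so the `.getD []` default is never taken
def checkIfValid (seen : PySem.Set Int) (x : Int) (rules : PySem.Dict Int (List Int)) : Bool :=
  checkIfValidLoop seen ((rules.get? x).getD [])

-- the 'for x in s: …' loop with the running `seen` set; `break` = returning false
def innerLoopA (rules : PySem.Dict Int (List Int)) : List Int → PySem.Set Int → Bool
  | [], _ => true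
  | x :: rest, seen =>
    if rules.contains x then
      if checkIfValid seen x rules then innerLoopA rules rest (PySem.Set.add seen x)
      else false
    else innerLoopA rules rest (PySem.Set.add seen x)

def filterSequences (rules : List (Int × List Int)) (sequences : List (List Int)) : List (List Int) × List (List Int) :=
  sequences.foldl
    (fun acc s =>
      if innerLoopA (PySem.Dict.mk rules) s PySem.Set.empty then (acc.1 ++ [s], acc.2)
      else (acc.1, acc.2 ++ [s]))
    ([], [])

-- ===== PORT B =====
-- _violates: 'for x in reversed(s): if x in after: return True; after.update(rules.get(x, ()))'
def violRevB (rules : PySem.Dict Int (List Int)) : List Int → PySem.Set Int → Bool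
  | [], _ => false
  | x :: rest, after =>
    if PySem.Set.contains after x then true
    else violRevB rules rest (PySem.Set.update after ((rules.get? x).getD []))

def filterSequences_alt (rules : List (Int × List Int)) (sequences : List (List Int)) : List (List Int) × List (List Int) :=
  sequences.foldl
    (fun acc s =>
      if violRevB (PySem.Dict.mk rules) s.reverse PySem.Set.empty then (acc.1, acc.2 ++ [s])
      else (acc.1 ++ [s], acc.2))
    ([], [])

-- ===== PRECONDITION & SPEC =====
def Spec_filterSequences (rules : List (Int × List Int)) (sequences : List (List Int)) (out : List (List Int) × List (List Int)) : Prop := out = filterSequences_alt rules sequences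
instance (rules : List (Int × List Int)) (sequences : List (List Int)) (out : List (List Int) × List (List Int)) : Decidable (Spec_filterSequences rules sequences out) := by unfold Spec_filterSequences; infer_instance

-- ===== CLAIM (what is proved, stated in full; the proofs are below) =====
def Claim_equal_filterSequences : Prop := ∀ (rules : List (Int × List Int)) (sequences : List (List Int)), Dom_filterSequences rules sequences → Spec_filterSequences rules sequences (filterSequences rules sequences)

-- ===== LEMMAS AND PROOFS =====

-- proof-only helper: forward pairwise test — head element against everything after it
def violPairF (rules : PySem.Dict Int (List Int)) : List Int → Bool
  | [] => false
  | x :: rest =>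
    rest.any (fun y => ((rules.get? y).getD []).any (fun v => v == x)) || violPairF rules rest

-- proof-only helper: pairwise test in the other orientation — later elements against the head's rule list
def violPairR (rules : PySem.Dict Int (List Int)) : List Int → Bool
  | [] => false
  | x :: rest =>
    rest.any (fun y => ((rules.get? x).getD []).any (fun v => v == y)) || violPairR rules rest

-- proof-only helper: A's loop state, recast as "a violation exists against seen ∪ earlier elements"
def violFrom (rules : PySem.Dict Int (List Int)) (seen : PySem.Set Int) : List Int → Bool
  | [] => false
  | x :: rest =>
    ((rules.get? x).getD []).any (fun v => PySem.Set.contains seen v) || violFrom rules (PySem.Set.add seen x) rest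

theorem checkIfValidLoop_eq (seen : PySem.Set Int) (l : List Int) :
    checkIfValidLoop seen l = !(l.any (fun v => PySem.Set.contains seen v)) := by
  induction l with
  | nil => rfl
  | cons v rest ih =>
    simp only [checkIfValidLoop, List.any_cons]
    by_cases h : v ∈ seen
    · simp [h]
    · simp [h, ih]

theorem innerLoopA_eq_not_violFrom (rules : PySem.Dict Int (List Int)) (l : List Int)
    (seen : PySem.Set Int) : innerLoopA rules l seen = !violFrom rules seen l := by
  induction l generalizing seen with
  | nil => rfl
  | cons x rest ih =>
    by_cases hc : rules.contains x = true
    · cases ha : ((rules.get? x).getD []).any (fun v => PySem.Set.contains seen v) with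
      | true =>
        simp only [innerLoopA, violFrom, checkIfValid, checkIfValidLoop_eq, hc, if_true]
        rw [ha]
        simp
      | false =>
        simp only [innerLoopA, violFrom, checkIfValid, checkIfValidLoop_eq, hc, if_true]
        rw [ha]
        simp [ih]
    · have hg : rules.get? x = none := by
        cases hge : rules.get? x with
        | none => rfl
        | some v =>
          exfalso
          apply hc
          rw [PySem.Dict.contains_eq_isSome_get?, hge]
          rfl
      have hcf : rules.contains x = false := eq_false_of_ne_true hc
      simp [innerLoopA, violFrom, hcf, hg, ih]

theorem contains_add (seen : PySem.Set Int) (x v : Int) :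
    PySem.Set.contains (PySem.Set.add seen x) v = (PySem.Set.contains seen v || (v == x)) := by
  by_cases h1 : v ∈ seen <;> by_cases h2 : v = x <;>
    simp [PySem.Set.mem_add, h1, h2]

theorem any_or_split (l : List Int) (f g : Int → Bool) :
    l.any (fun v => f v || g v) = (l.any f || l.any g) := by
  induction l with
  | nil => rfl
  | cons x rest ih =>
    simp only [List.any_cons, ih]
    cases f x <;> cases g x <;> cases rest.any f <;> cases rest.any g <;> rfl

theorem violFrom_eq (rules : PySem.Dict Int (List Int)) (l : List Int) (seen : PySem.Set Int) :
    violFrom rules seen l =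
      (l.any (fun y => ((rules.get? y).getD []).any (fun v => PySem.Set.contains seen v)) ||
        violPairF rules l) := by
  induction l generalizing seen with
  | nil => rfl
  | cons x rest ih =>
    simp only [violFrom, violPairF, List.any_cons, ih]
    have hstep :
        (rest.any (fun y => ((rules.get? y).getD []).any (fun v => PySem.Set.contains (PySem.Set.add seen x) v))) =
        (rest.any (fun y => ((rules.get? y).getD []).any (fun v => PySem.Set.contains seen v)) ||
         rest.any (fun y => ((rules.get? y).getD []).any (fun v => v == x))) := by
      rw [← any_or_split]
      apply PySem.List.any_congr_mem
      intro y _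
      simp only [contains_add]
      exact any_or_split _ _ _
    rw [hstep]
    cases ((rules.get? x).getD []).any (fun v => PySem.Set.contains seen v) <;>
      cases rest.any (fun y => ((rules.get? y).getD []).any (fun v => PySem.Set.contains seen v)) <;>
      cases rest.any (fun y => ((rules.get? y).getD []).any (fun v => v == x)) <;>
      cases violPairF rules rest <;> rfl

theorem contains_update (after : PySem.Set Int) (xs : List Int) (v : Int) :
    PySem.Set.contains (PySem.Set.update after xs) v =
      (PySem.Set.contains after v || xs.any (fun u => u == v)) := by
  by_cases h1 : v ∈ after <;> by_cases h2 : v ∈ xs <;>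
    simp [PySem.Set.mem_update, h1, h2, List.any_eq_true]
  exact fun x hx hxv => h2 (hxv ▸ hx)

theorem violRevB_eq (rules : PySem.Dict Int (List Int)) (l : List Int) (after : PySem.Set Int) :
    violRevB rules l after =
      (l.any (fun y => PySem.Set.contains after y) || violPairR rules l) := by
  induction l generalizing after with
  | nil => rfl
  | cons x rest ih =>
    simp only [violRevB, violPairR, List.any_cons]
    by_cases hx : PySem.Set.contains after x = true
    · simp only [hx, if_true, Bool.true_or]
    · have hxf : PySem.Set.contains after x = false := eq_false_of_ne_true hx
      rw [if_neg (by rw [hxf]; exact Bool.false_ne_true), ih]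
      have hstep :
          (rest.any fun y => PySem.Set.contains (PySem.Set.update after ((rules.get? x).getD [])) y) =
          (rest.any (fun y => PySem.Set.contains after y) ||
           rest.any (fun y => ((rules.get? x).getD []).any (fun u => u == y))) := by
        rw [← any_or_split]
        apply PySem.List.any_congr_mem
        intro y _
        exact contains_update after _ y
      rw [hstep, hxf]
      cases rest.any (fun y => PySem.Set.contains after y) <;>
        cases rest.any (fun y => ((rules.get? x).getD []).any (fun u => u == y)) <;>
        cases violPairR rules rest <;> rfl

theorem violPairR_append (rules : PySem.Dict Int (List Int)) (ys : List Int) (x : Int) :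
    violPairR rules (ys ++ [x]) =
      (violPairR rules ys || ys.any (fun y => ((rules.get? y).getD []).any (fun v => v == x))) := by
  induction ys with
  | nil => simp [violPairR]
  | cons z zs ih =>
    simp only [List.cons_append, violPairR, ih, List.any_append, List.any_cons, List.any_nil]
    cases (zs.any fun y => ((rules.get? z).getD []).any fun v => v == y) <;>
      cases ((rules.get? z).getD []).any (fun v => v == x) <;>
      cases violPairR rules zs <;>
      cases (zs.any fun y => ((rules.get? y).getD []).any fun v => v == x) <;> rfl

theorem violPairF_eq_reverse (rules : PySem.Dict Int (List Int)) (l : List Int) :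
    violPairF rules l = violPairR rules l.reverse := by
  induction l with
  | nil => rfl
  | cons x rest ih =>
    simp only [violPairF, List.reverse_cons, violPairR_append, ← ih, List.any_reverse]
    exact Bool.or_comm _ _

theorem innerLoopA_empty_eq (rules : PySem.Dict Int (List Int)) (l : List Int) :
    innerLoopA rules l PySem.Set.empty = !violRevB rules l.reverse PySem.Set.empty := by
  rw [innerLoopA_eq_not_violFrom, violFrom_eq, violRevB_eq, ← violPairF_eq_reverse]
  have h1 : (l.any fun y => ((rules.get? y).getD []).any fun v => PySem.Set.contains PySem.Set.empty v) = false := by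
    simp [PySem.Set.empty, PySem.Set.contains]
  have h2 : (l.reverse.any fun y => PySem.Set.contains PySem.Set.empty y) = false := by
    simp [PySem.Set.empty, PySem.Set.contains]
  rw [h1, h2]

-- ===== VERDICT (by name: the statement is the Claim_ definition above) =====
theorem filterSequences_spec : Claim_equal_filterSequences := by
  intro rules sequences _
  unfold Spec_filterSequences filterSequences filterSequences_alt
  apply PySem.List.foldl_congr_mem
  intro acc s _
  rw [innerLoopA_empty_eq]
  cases violRevB (PySem.Dict.mk rules) s.reverse PySem.Set.empty <;> rfl
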